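-- pv_equiv track=rewrite | github.com/hendrixx-cnc/AURA | AURA-main/aura_compression/discovery.py | _find_common_structure
-- ===== SOURCE A (Python) =====
-- from typing import List, Dict, Optional, Set, Tuple
--
-- def _find_common_structure(messages: List[str]) -> Optional[str]:
--     """
--     Find common structure across messages, marking variations as {0}, {1}, etc.
--     """
--     if len(messages) < 2:
--         return messages[0] if messages else None
--
--     # Start with first message as reference
--     reference = messages[0]
--     tokens = reference.split()
--
--     # Find token positions that vary across messages
--     variable_positions = set()
--     for i, token in enumerate(tokens):
--         # Check if this token varies in other messages
--         for other_msg in messages[1:]: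
--             other_tokens = other_msg.split()
--             if i >= len(other_tokens) or other_tokens[i] != token:
--                 variable_positions.add(i)
--                 break
--
--     # Build pattern with slots
--     pattern_tokens = []
--     slot_index = 0
--     for i, token in enumerate(tokens):
--         if i in variable_positions:
--             pattern_tokens.append(f'{{{slot_index}}}')
--             slot_index += 1
--         else:
--             pattern_tokens.append(token)
--
--     pattern = ' '.join(pattern_tokens)
--
--     # Only return pattern if it has some fixed structure
--     if pattern.count('{') >= len(tokens):
--         return None  # Too generic
--
--     return pattern
-- ===== SOURCE B (Python) =====
-- from typing import List, Optional
--
-- def _find_common_structure(messages: List[str]) -> Optional[str]: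
--     if len(messages) < 2:
--         return messages[0] if messages else None
--
--     tokens = messages[0].split()
--     others = [m.split() for m in messages[1:]]
--
--     # Maintain the set of positions still constant across all messages seen so far.
--     constant = set(range(len(tokens)))
--     for other in others:
--         constant = {i for i in constant if i < len(other) and other[i] == tokens[i]}
--
--     pattern_tokens = []
--     slot_index = 0
--     for i, token in enumerate(tokens):
--         if i in constant:
--             pattern_tokens.append(token)
--         else:
--             pattern_tokens.append('{%d}' % slot_index)
--             slot_index += 1
--
--     pattern = ' '.join(pattern_tokens)
--     if pattern.count('{') >= len(tokens):
--         return None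
--     return pattern
-- ===== Notes on version B (the rewrite author's own statement) =====
-- stated objective: alternative
-- what changed: Replaces A's per-token inner scan over all other messages (with break) by splitting every message once and folding over the other messages while shrinking a set of still-constant positions; the pattern is then built from the complement of that set.
import Mathlib
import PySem

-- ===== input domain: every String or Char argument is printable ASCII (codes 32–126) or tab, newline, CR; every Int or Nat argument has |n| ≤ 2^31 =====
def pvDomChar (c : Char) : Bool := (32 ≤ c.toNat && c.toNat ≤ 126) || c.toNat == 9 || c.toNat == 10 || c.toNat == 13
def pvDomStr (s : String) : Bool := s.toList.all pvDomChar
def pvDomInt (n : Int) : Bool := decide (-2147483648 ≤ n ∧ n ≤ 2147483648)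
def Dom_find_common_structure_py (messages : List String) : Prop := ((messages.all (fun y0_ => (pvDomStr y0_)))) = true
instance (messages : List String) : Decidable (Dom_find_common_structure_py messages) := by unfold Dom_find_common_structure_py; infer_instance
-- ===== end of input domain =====

-- B replaces A's per-token rescans of all other messages by one split per message and a fold
-- shrinking a set of still-constant positions (alternative decomposition, same results).

-- ===== PORT A =====
-- inner loop "for other_msg in messages[1:]: … break" of A
def aCheckVar (rest : List String) (i : Int) (token : String) : Bool :=
  match rest with
  | [] => false
  | other :: rs =>
    let ot := PySem.Str.split₀ other
    if decide ((ot.length : Int) ≤ i) || (PySem.List.pyGetD ot i "" != token) then true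
    else aCheckVar rs i token

def find_common_structure_py (messages : List String) : Option String :=
  match messages with
  | [] => none
  | [m] => some m
  | reference :: rest =>
    let tokens := PySem.Str.split₀ reference
    let variable_positions : PySem.Set Int :=
      (PySem.List.enumerate tokens).foldl
        (fun s p => if aCheckVar rest p.1 p.2 then PySem.Set.add s p.1 else s)
        PySem.Set.empty
    let built :=
      (PySem.List.enumerate tokens).foldl
        (fun (acc : List String × Int) p =>
          if PySem.Set.contains variable_positions p.1 then
            (acc.1 ++ ["{" ++ PySem.Int.toStr acc.2 ++ "}"], acc.2 + 1)
          else (acc.1 ++ [p.2], acc.2))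
        ([], 0)
    let pattern := PySem.Str.join " " built.1
    if tokens.length ≤ PySem.Str.count pattern "{" then none else some pattern

-- ===== PORT B =====
def find_common_structure_py_alt (messages : List String) : Option String :=
  if messages.length < 2 then PySem.List.pyGet? messages 0
  else
    let reference := (PySem.List.pyGetD messages 0 "")
    let rest := messages.tail
    let tokens := PySem.Str.split₀ reference
    let others := rest.map PySem.Str.split₀
    let constant : PySem.Set Int :=
      others.foldl
        (fun s other =>
          s.filter (fun i => decide (i < (other.length : Int)) &&
            (PySem.List.pyGetD other i "" == PySem.List.pyGetD tokens i "")))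
        (PySem.Set.ofList (PySem.List.pyRange 0 tokens.length 1))
    let built :=
      (PySem.List.enumerate tokens).foldl
        (fun (acc : List String × Int) p =>
          if PySem.Set.contains constant p.1 then (acc.1 ++ [p.2], acc.2)
          else (acc.1 ++ ["{" ++ PySem.Int.toStr acc.2 ++ "}"], acc.2 + 1))
        ([], 0)
    let pattern := PySem.Str.join " " built.1
    if tokens.length ≤ PySem.Str.count pattern "{" then none else some pattern

-- ===== PRECONDITION & SPEC =====
def Spec_find_common_structure_py (messages : List String) (out : Option String) : Prop := out = find_common_structure_py_alt messages
instance (messages : List String) (out : Option String) : Decidable (Spec_find_common_structure_py messages out) := by unfold Spec_find_common_structure_py; infer_instance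

-- ===== CLAIM (what is proved, stated in full; the proofs are below) =====
def Claim_equal_find_common_structure_py : Prop := ∀ (messages : List String), Dom_find_common_structure_py messages → Spec_find_common_structure_py messages (find_common_structure_py messages)

-- ===== LEMMAS AND PROOFS =====

-- membership in A's "add i on condition" fold
lemma mem_foldl_add_if {α : Type} (q : Int × α → Bool) :
    ∀ (l : List (Int × α)) (s0 : PySem.Set Int) (x : Int),
      x ∈ l.foldl (fun s p => if q p then PySem.Set.add s p.1 else s) s0 ↔
        x ∈ s0 ∨ ∃ p ∈ l, q p ∧ p.1 = x := by
  intro l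
  induction l with
  | nil => simp
  | cons p l ih =>
    intro s0 x
    rw [List.foldl_cons]
    by_cases hq : q p = true
    · rw [if_pos hq, ih]
      simp only [PySem.Set.mem_add, List.mem_cons]
      constructor
      · rintro ((h | h) | ⟨p', hp', h1, h2⟩)
        · exact Or.inl h
        · exact Or.inr ⟨p, Or.inl rfl, hq, h.symm⟩
        · exact Or.inr ⟨p', Or.inr hp', h1, h2⟩
      · rintro (h | ⟨p', rfl | hp', h1, h2⟩)
        · exact Or.inl (Or.inl h)
        · exact Or.inl (Or.inr h2.symm)
        · exact Or.inr ⟨p', hp', h1, h2⟩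
    · rw [if_neg hq, ih]
      simp only [List.mem_cons]
      constructor
      · rintro (h | ⟨p', hp', h1, h2⟩)
        · exact Or.inl h
        · exact Or.inr ⟨p', Or.inr hp', h1, h2⟩
      · rintro (h | ⟨p', rfl | hp', h1, h2⟩)
        · exact Or.inl h
        · exact absurd h1 hq
        · exact Or.inr ⟨p', hp', h1, h2⟩

-- membership in B's "filter on each other message" fold
lemma mem_foldl_filter {β : Type} (r : β → Int → Bool) :
    ∀ (l : List β) (s0 : List Int) (x : Int),
      x ∈ l.foldl (fun s o => s.filter (r o)) s0 ↔ x ∈ s0 ∧ ∀ o ∈ l, r o x = true := by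
  intro l
  induction l with
  | nil => simp
  | cons o l ih =>
    intro s0 x
    simp only [List.foldl_cons, ih, List.mem_filter, List.mem_cons]
    constructor
    · rintro ⟨⟨h1, h2⟩, h3⟩
      exact ⟨h1, by rintro o' (rfl | ho') <;> [exact h2; exact h3 o' ho']⟩
    · rintro ⟨h1, h2⟩
      exact ⟨⟨h1, h2 o (Or.inl rfl)⟩, fun o' ho' => h2 o' (Or.inr ho')⟩

-- A's inner break loop is an existential over the other messages
lemma aCheckVar_iff (rest : List String) (i : Int) (token : String) :
    aCheckVar rest i token = true ↔
      ∃ o ∈ rest, ((PySem.Str.split₀ o).length : Int) ≤ i ∨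
        PySem.List.pyGetD (PySem.Str.split₀ o) i "" ≠ token := by
  induction rest with
  | nil => simp [aCheckVar]
  | cons o rs ih =>
    show (if decide (((PySem.Str.split₀ o).length : Int) ≤ i) ||
        (PySem.List.pyGetD (PySem.Str.split₀ o) i "" != token) then true
      else aCheckVar rs i token) = true ↔ _
    by_cases h : ((PySem.Str.split₀ o).length : Int) ≤ i ∨
        PySem.List.pyGetD (PySem.Str.split₀ o) i "" ≠ token
    · have hb : (decide (((PySem.Str.split₀ o).length : Int) ≤ i) ||
          (PySem.List.pyGetD (PySem.Str.split₀ o) i "" != token)) = true := by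
        simpa [Bool.or_eq_true, decide_eq_true_iff, bne_iff_ne] using h
      rw [if_pos hb]
      simp only [List.mem_cons, true_iff]
      exact ⟨o, Or.inl rfl, h⟩
    · have hb : ¬ ((decide (((PySem.Str.split₀ o).length : Int) ≤ i) ||
          (PySem.List.pyGetD (PySem.Str.split₀ o) i "" != token)) = true) := by
        simpa [Bool.or_eq_true, decide_eq_true_iff, bne_iff_ne] using h
      rw [if_neg hb, ih]
      constructor
      · rintro ⟨o', ho', hp⟩
        exact ⟨o', List.mem_cons_of_mem _ ho', hp⟩
      · rintro ⟨o', ho', hp⟩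
        rcases List.mem_cons.mp ho' with rfl | ho''
        · exact absurd hp h
        · exact ⟨o', ho'', hp⟩

theorem find_common_structure_py_spec : Claim_equal_find_common_structure_py := by
  intro messages _
  unfold Spec_find_common_structure_py
  match messages with
  | [] => rfl
  | [m] => rfl
  | reference :: o1 :: os =>
    have hlen : ¬ ((reference :: o1 :: os).length < 2) := by simp
    have href : PySem.List.pyGetD (reference :: o1 :: os) 0 "" = reference := by
      simp [PySem.List.pyGetD, PySem.List.pyGet?, PySem.List.pyIdx?, show (0:Int) ≤ (os.length:Int) + 1 by omega]
    simp only [find_common_structure_py, find_common_structure_py_alt, if_neg hlen,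
      List.tail_cons, href]
    set rest : List String := o1 :: os with hrest
    set tokens : List String := PySem.Str.split₀ reference with htokens
    set vs : PySem.Set Int :=
      (PySem.List.enumerate tokens).foldl
        (fun s p => if aCheckVar rest p.1 p.2 then PySem.Set.add s p.1 else s)
        PySem.Set.empty with hvs
    set cs : PySem.Set Int :=
      (rest.map PySem.Str.split₀).foldl
        (fun s other =>
          s.filter (fun i => decide (i < (other.length : Int)) &&
            (PySem.List.pyGetD other i "" == PySem.List.pyGetD tokens i "")))
        (PySem.Set.ofList (PySem.List.pyRange 0 tokens.length 1)) with hcs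
    have hpt : ∀ (k : Nat), k < tokens.length →
        PySem.Set.contains vs ((k : Int)) = !PySem.Set.contains cs ((k : Int)) := by
      intro k hk
      have hv : PySem.Set.contains vs ((k : Int)) = true ↔
          aCheckVar rest (k : Int) tokens[k] = true := by
        rw [PySem.Set.contains_iff, hvs, mem_foldl_add_if]
        constructor
        · rintro (h | ⟨p, hp, hq, hp1⟩)
          · simp [PySem.Set.empty] at h
          · obtain ⟨k', hk', rfl⟩ := (PySem.List.mem_enumerate_iff _ _ _).mp hp
            simp only [zero_add] at hp1 hq ⊢
            have : k' = k := by exact_mod_cast hp1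
            subst this; exact hq
        · intro h
          refine Or.inr ⟨((k : Int), tokens[k]), ?_, h, rfl⟩
          rw [PySem.List.mem_enumerate_iff]
          exact ⟨k, hk, by simp⟩
      have hc : PySem.Set.contains cs ((k : Int)) = true ↔
          ∀ o ∈ rest, ((k : Int) < ((PySem.Str.split₀ o).length : Int) ∧
            PySem.List.pyGetD (PySem.Str.split₀ o) (k : Int) "" = tokens[k]) := by
        rw [PySem.Set.contains_iff, hcs, mem_foldl_filter]
        have hmem : ((k : Int)) ∈ PySem.Set.ofList (PySem.List.pyRange 0 tokens.length 1) := by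
          rw [PySem.Set.mem_ofList, PySem.List.mem_pyRange_one]
          constructor <;> omega
        have htk : PySem.List.pyGetD tokens ((k : Int)) "" = tokens[k] := by
          simp [PySem.List.pyGetD_natCast, List.getD_eq_getElem?_getD, hk]
        constructor
        · rintro ⟨-, h⟩ o ho
          have := h (PySem.Str.split₀ o) (List.mem_map_of_mem ho)
          simp only [Bool.and_eq_true, decide_eq_true_iff, beq_iff_eq, htk] at this
          exact this
        · intro h
          refine ⟨hmem, ?_⟩
          intro ot hot
          obtain ⟨o, ho, rfl⟩ := List.mem_map.mp hot
          simp only [Bool.and_eq_true, decide_eq_true_iff, beq_iff_eq, htk]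
          exact h o ho
      rw [aCheckVar_iff] at hv
      cases hcv : PySem.Set.contains cs ((k : Int)) with
      | true =>
        simp only [Bool.not_true]
        have hall := hc.mp hcv
        rw [Bool.eq_false_iff, ne_eq, hv]
        rintro ⟨o, ho, h⟩
        rcases h with h | h
        · exact absurd (hall o ho).1 (by omega)
        · exact h (hall o ho).2
      | false =>
        simp only [Bool.not_false]
        rw [hv]
        by_contra hno
        have hall : ∀ o ∈ rest, ((k : Int) < ((PySem.Str.split₀ o).length : Int) ∧
            PySem.List.pyGetD (PySem.Str.split₀ o) ((k : Int)) "" = tokens[k]) := by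
          intro o ho
          have h1 : ¬ (((PySem.Str.split₀ o).length : Int) ≤ (k : Int) ∨
              PySem.List.pyGetD (PySem.Str.split₀ o) ((k : Int)) "" ≠ tokens[k]) :=
            fun hcontra => hno ⟨o, ho, hcontra⟩
          rw [not_or, not_not] at h1
          exact ⟨by omega, h1.2⟩
        rw [hc.mpr hall] at hcv
        exact Bool.noConfusion hcv
    have hfold :
        (PySem.List.enumerate tokens).foldl
          (fun (acc : List String × Int) p =>
            if PySem.Set.contains vs p.1 then
              (acc.1 ++ ["{" ++ PySem.Int.toStr acc.2 ++ "}"], acc.2 + 1)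
            else (acc.1 ++ [p.2], acc.2)) ([], 0) =
        (PySem.List.enumerate tokens).foldl
          (fun (acc : List String × Int) p =>
            if PySem.Set.contains cs p.1 then (acc.1 ++ [p.2], acc.2)
            else (acc.1 ++ ["{" ++ PySem.Int.toStr acc.2 ++ "}"], acc.2 + 1)) ([], 0) := by
      apply PySem.List.foldl_congr_mem
      intro acc p hp
      obtain ⟨k, hk, rfl⟩ := (PySem.List.mem_enumerate_iff _ _ _).mp hp
      simp only [zero_add]
      rw [hpt k hk]
      cases PySem.Set.contains cs ((k : Int)) <;> simp
    rw [hfold]
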